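-- pv_equiv track=rewrite | github.com/guswns9302/alvis | app/services.py | _paths_overlap
-- ===== SOURCE A (Python) =====
-- def _paths_overlap(left: list[str], right: list[str]) -> bool:
--     if not left or not right:
--         return False
--     for lhs in left:
--         lhs_clean = lhs.rstrip("/")
--         for rhs in right:
--             rhs_clean = rhs.rstrip("/")
--             if lhs_clean == rhs_clean:
--                 return True
--             if lhs_clean.startswith(f"{rhs_clean}/") or rhs_clean.startswith(f"{lhs_clean}/"):
--                 return True
--     return False
-- ===== SOURCE B (Python) =====
-- def _paths_overlap(left: list[str], right: list[str]) -> bool: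
--     # Index the cleaned right paths and all their "/"-boundary ancestor
--     # prefixes in sets once, then answer each left path by set membership.
--     right_clean = set()
--     right_anc = set()
--     for rhs in right:
--         r = rhs.rstrip("/")
--         right_clean.add(r)
--         right_anc.add(r)
--         for i in range(len(r)):
--             if r[i] == "/":
--                 right_anc.add(r[:i])
--     for lhs in left:
--         l = lhs.rstrip("/")
--         if l in right_anc:
--             return True
--         for i in range(len(l)):
--             if l[i] == "/" and l[:i] in right_clean:
--                 return True
--     return False
-- ===== Notes on version B (the rewrite author's own statement) =====
-- stated objective: alternative
-- what changed: Instead of comparing every left path against every right path, B builds two sets in one pass over right (the cleaned right paths, and those paths together with all their '/'-boundary ancestor prefixes) and then answers each left path by set membership of the path and of its own boundary prefixes; worst case O((n+m)*L) lookups instead of O(n*m) pairwise comparisons, but it gives up A's early exit on the first hit.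
import Mathlib
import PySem

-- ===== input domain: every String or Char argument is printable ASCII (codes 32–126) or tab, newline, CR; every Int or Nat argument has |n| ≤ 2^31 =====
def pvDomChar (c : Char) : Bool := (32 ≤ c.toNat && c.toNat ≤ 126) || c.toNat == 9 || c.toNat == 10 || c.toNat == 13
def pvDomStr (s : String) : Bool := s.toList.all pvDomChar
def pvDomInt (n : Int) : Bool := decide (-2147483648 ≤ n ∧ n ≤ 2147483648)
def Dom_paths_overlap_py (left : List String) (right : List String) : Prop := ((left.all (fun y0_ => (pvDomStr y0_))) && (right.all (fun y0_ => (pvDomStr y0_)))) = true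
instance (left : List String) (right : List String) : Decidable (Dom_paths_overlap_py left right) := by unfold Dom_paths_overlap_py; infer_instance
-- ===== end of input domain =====

-- B indexes the cleaned right paths and their "/"-boundary ancestor prefixes in two sets,
-- then answers each left path by membership; same return value, one pass over each list.

-- shared helper: hand port of Python's s.rstrip("/") (drop all trailing '/' chars; exact)
def pvRstripSlash (s : String) : List Char :=
  (s.toList.reverse.dropWhile (fun c => c == '/')).reverse

-- ===== PORT A =====
def paths_overlap_py (left : List String) (right : List String) : Bool :=
  if left = [] ∨ right = [] then false
  else
    left.any (fun lhs =>
      let lhs_clean := pvRstripSlash lhs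
      right.any (fun rhs =>
        let rhs_clean := pvRstripSlash rhs
        (lhs_clean == rhs_clean) ||
        PySem.Chars.startswith lhs_clean (rhs_clean ++ ['/']) ||
        PySem.Chars.startswith rhs_clean (lhs_clean ++ ['/'])))

-- ===== PORT B =====
def paths_overlap_py_alt (left : List String) (right : List String) : Bool :=
  let st : PySem.Set (List Char) × PySem.Set (List Char) :=
    right.foldl (fun st rhs =>
      let r := pvRstripSlash rhs
      let st1 := (st.1.add r, st.2.add r)
      (List.range r.length).foldl
        (fun st2 i => if r[i]? == some '/' then (st2.1, st2.2.add (r.take i)) else st2) st1)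
      (PySem.Set.ofList [], PySem.Set.ofList [])
  left.any (fun lhs =>
    let l := pvRstripSlash lhs
    st.2.contains l ||
    (List.range l.length).any (fun i => (l[i]? == some '/') && st.1.contains (l.take i)))

-- ===== PRECONDITION & SPEC =====
def Spec_paths_overlap_py (left : List String) (right : List String) (out : Bool) : Prop := out = paths_overlap_py_alt left right
instance (left : List String) (right : List String) (out : Bool) : Decidable (Spec_paths_overlap_py left right out) := by unfold Spec_paths_overlap_py; infer_instance

-- ===== CLAIM (what is proved, stated in full; the proofs are below) =====
def Claim_equal_paths_overlap_py : Prop := ∀ (left : List String) (right : List String), Dom_paths_overlap_py left right → Spec_paths_overlap_py left right (paths_overlap_py left right)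

-- ===== LEMMAS AND PROOFS =====

-- a "/"-boundary proper prefix of b, as found by scanning indices, is exactly a with a++"/" a prefix of b
theorem pv_boundary_iff (a b : List Char) :
    (∃ i, i < b.length ∧ b[i]? = some '/' ∧ a = b.take i) ↔ (a ++ ['/']) <+: b := by
  constructor
  · rintro ⟨i, hi, hc, rfl⟩
    have h1 : b.take i ++ ['/'] = b.take (i+1) := by
      rw [List.take_add_one, hc]; rfl
    rw [h1]; exact List.take_prefix _ _
  · intro h
    have hlen : a.length + 1 ≤ b.length := by simpa using h.length_le
    have ha : a <+: b := (List.prefix_append a ['/']).trans h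
    have hat : b.take a.length = a := (List.prefix_iff_eq_take.mp ha).symm
    have h1 : a ++ ['/'] = b.take (a.length + 1) := by
      simpa using List.prefix_iff_eq_take.mp h
    rw [List.take_add_one, hat] at h1
    have h2 : ['/'] = b[a.length]?.toList := List.append_cancel_left h1
    refine ⟨a.length, by omega, ?_, hat.symm⟩
    cases hq : b[a.length]? with
    | none => rw [hq] at h2; simp at h2
    | some c => rw [hq] at h2; simp at h2; rw [h2]

-- the inner index fold leaves the first set unchanged
theorem pv_inner_fst (r : List Char) (is : List ℕ) (st : PySem.Set (List Char) × PySem.Set (List Char)) :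
    (is.foldl (fun st2 i => if r[i]? == some '/' then (st2.1, st2.2.add (r.take i)) else st2) st).1 = st.1 := by
  induction is generalizing st with
  | nil => rfl
  | cons i is ih => simp only [List.foldl_cons]; split <;> exact ih _

-- membership in the second set after the inner index fold
theorem pv_inner_snd (r : List Char) (is : List ℕ) (st : PySem.Set (List Char) × PySem.Set (List Char)) (x : List Char) :
    x ∈ (is.foldl (fun st2 i => if r[i]? == some '/' then (st2.1, st2.2.add (r.take i)) else st2) st).2 ↔
      x ∈ st.2 ∨ ∃ i ∈ is, r[i]? = some '/' ∧ x = r.take i := by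
  induction is generalizing st with
  | nil => simp
  | cons i is ih =>
    simp only [List.foldl_cons]
    by_cases h : r[i]? = some '/'
    · simp only [h, beq_self_eq_true, if_true, ih, PySem.Set.mem_add, List.mem_cons]
      constructor
      · rintro ((hx | hx) | ⟨j, hj, hjx⟩)
        · exact Or.inl hx
        · exact Or.inr ⟨i, Or.inl rfl, h, hx⟩
        · exact Or.inr ⟨j, Or.inr hj, hjx⟩
      · rintro (hx | ⟨j, (rfl | hj), hjc, hjx⟩)
        · exact Or.inl (Or.inl hx)
        · exact Or.inl (Or.inr hjx)
        · exact Or.inr ⟨j, hj, hjc, hjx⟩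
    · have : (r[i]? == some '/') = false := by simpa using h
      simp only [this, ih, List.mem_cons]
      constructor
      · rintro (hx | ⟨j, hj, hjx⟩)
        · exact Or.inl hx
        · exact Or.inr ⟨j, Or.inr hj, hjx⟩
      · rintro (hx | ⟨j, (rfl | hj), hjc, hjx⟩)
        · exact Or.inl hx
        · exact absurd hjc h
        · exact Or.inr ⟨j, hj, hjc, hjx⟩

-- membership in the two sets built by the outer fold over right
theorem pv_outer (right : List String) (st : PySem.Set (List Char) × PySem.Set (List Char)) (x : List Char) :
    (x ∈ (right.foldl (fun st rhs =>
        let r := pvRstripSlash rhs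
        let st1 := (st.1.add r, st.2.add r)
        (List.range r.length).foldl
          (fun st2 i => if r[i]? == some '/' then (st2.1, st2.2.add (r.take i)) else st2) st1) st).1 ↔
      x ∈ st.1 ∨ ∃ r ∈ right, x = pvRstripSlash r) ∧
    (x ∈ (right.foldl (fun st rhs =>
        let r := pvRstripSlash rhs
        let st1 := (st.1.add r, st.2.add r)
        (List.range r.length).foldl
          (fun st2 i => if r[i]? == some '/' then (st2.1, st2.2.add (r.take i)) else st2) st1) st).2 ↔
      x ∈ st.2 ∨ ∃ r ∈ right, (x = pvRstripSlash r ∨ (x ++ ['/']) <+: pvRstripSlash r)) := by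
  induction right generalizing st with
  | nil => simp
  | cons rhs rest ih =>
    simp only [List.foldl_cons, List.exists_mem_cons_iff]
    have hb : (∃ i ∈ List.range (pvRstripSlash rhs).length,
        (pvRstripSlash rhs)[i]? = some '/' ∧ x = (pvRstripSlash rhs).take i) ↔
        (x ++ ['/']) <+: pvRstripSlash rhs := by
      simpa [List.mem_range, and_assoc] using pv_boundary_iff x (pvRstripSlash rhs)
    constructor
    · rw [(ih _).1, pv_inner_fst, PySem.Set.mem_add]
      tauto
    · rw [(ih _).2, pv_inner_snd, PySem.Set.mem_add, hb]
      simp only [or_assoc]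

-- the clean-set built by B contains exactly the cleaned right paths
theorem pv_mem_clean (right : List String) (x : List Char) :
    x ∈ (right.foldl (fun st rhs =>
        (List.range (pvRstripSlash rhs).length).foldl
          (fun st2 i => if (pvRstripSlash rhs)[i]? == some '/' then
              (st2.1, st2.2.add ((pvRstripSlash rhs).take i)) else st2)
          (st.1.add (pvRstripSlash rhs), st.2.add (pvRstripSlash rhs)))
        ((PySem.Set.ofList [], PySem.Set.ofList []) : PySem.Set (List Char) × PySem.Set (List Char))).1 ↔
      ∃ r ∈ right, x = pvRstripSlash r := by
  have h := (pv_outer right (PySem.Set.ofList [], PySem.Set.ofList []) x).1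
  simp only [PySem.Set.mem_ofList, List.not_mem_nil, false_or] at h
  exact h

-- the ancestor-set built by B contains exactly the cleaned right paths and their "/"-boundary prefixes
theorem pv_mem_anc (right : List String) (x : List Char) :
    x ∈ (right.foldl (fun st rhs =>
        (List.range (pvRstripSlash rhs).length).foldl
          (fun st2 i => if (pvRstripSlash rhs)[i]? == some '/' then
              (st2.1, st2.2.add ((pvRstripSlash rhs).take i)) else st2)
          (st.1.add (pvRstripSlash rhs), st.2.add (pvRstripSlash rhs)))
        ((PySem.Set.ofList [], PySem.Set.ofList []) : PySem.Set (List Char) × PySem.Set (List Char))).2 ↔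
      ∃ r ∈ right, (x = pvRstripSlash r ∨ (x ++ ['/']) <+: pvRstripSlash r) := by
  have h := (pv_outer right (PySem.Set.ofList [], PySem.Set.ofList []) x).2
  simp only [PySem.Set.mem_ofList, List.not_mem_nil, false_or] at h
  exact h

theorem pv_A_iff (left right : List String) :
    paths_overlap_py left right = true ↔
      ∃ l ∈ left, ∃ r ∈ right,
        (pvRstripSlash l = pvRstripSlash r ∨
         (pvRstripSlash r ++ ['/']) <+: pvRstripSlash l ∨
         (pvRstripSlash l ++ ['/']) <+: pvRstripSlash r) := by
  unfold paths_overlap_py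
  split
  · next h =>
    rcases h with rfl | rfl <;> simp
  · next h =>
    simp [List.any_eq_true, PySem.Chars.startswith_iff, or_assoc]

theorem pv_B_iff (left right : List String) :
    paths_overlap_py_alt left right = true ↔
      ∃ l ∈ left, ∃ r ∈ right,
        (pvRstripSlash l = pvRstripSlash r ∨
         (pvRstripSlash r ++ ['/']) <+: pvRstripSlash l ∨
         (pvRstripSlash l ++ ['/']) <+: pvRstripSlash r) := by
  unfold paths_overlap_py_alt
  simp only [List.any_eq_true, Bool.or_eq_true, Bool.and_eq_true,
    PySem.Set.contains_iff, pv_mem_clean, pv_mem_anc]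
  simp only [List.mem_range, beq_iff_eq]
  refine exists_congr fun l => and_congr_right fun _ => ?_
  constructor
  · rintro (⟨r, hr, (h | h)⟩ | ⟨i, hi, hc, r, hr, ht⟩)
    · exact ⟨r, hr, Or.inl h⟩
    · exact ⟨r, hr, Or.inr (Or.inr h)⟩
    · exact ⟨r, hr, Or.inr (Or.inl ((pv_boundary_iff _ _).mp ⟨i, hi, hc, ht.symm⟩))⟩
  · rintro ⟨r, hr, (h | h | h)⟩
    · exact Or.inl ⟨r, hr, Or.inl h⟩
    · obtain ⟨i, hi, hc, ht⟩ := (pv_boundary_iff _ _).mpr h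
      exact Or.inr ⟨i, hi, hc, r, hr, ht.symm⟩
    · exact Or.inl ⟨r, hr, Or.inr h⟩

-- ===== VERDICT (by name: the statement is the Claim_ definition above) =====
theorem paths_overlap_py_spec : Claim_equal_paths_overlap_py := by
  intro left right _
  unfold Spec_paths_overlap_py
  rw [Bool.eq_iff_iff, pv_A_iff, pv_B_iff]
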